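-- pv_equiv track=rewrite | github.com/rogerrojur/nl2sql | code/sqlova/utils/utils_wikisql.py | get_wrcn1
-- ===== SOURCE A (Python) =====
-- from collections import defaultdict
--
-- def get_wrcn1(cols):
--     d = defaultdict(int)
--     if len(cols) >= 2:
--         for col in cols:
--             d[col] += 1
--         for key in d:
--             if d[key] >= 2:
--                 return [int(key), d[key]]
--     return [-1, -1]
-- ===== SOURCE B (Python) =====
-- def get_wrcn1(cols):
--     # Duplicate-ahead scan: peel elements off the front; the first element that
--     # still occurs in the remaining tail is the first-appearing repeated column.
--     if len(cols) >= 2: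
--         tail = list(cols)
--         while tail:
--             col = tail.pop(0)
--             if col in tail:
--                 return [int(col), 1 + tail.count(col)]
--     return [-1, -1]
-- ===== Notes on version B (the rewrite author's own statement) =====
-- stated objective: alternative
-- what changed: Replaces A's frequency-dict build plus a second pass over its keys by a duplicate-ahead scan: elements are peeled off the front and the first one still present in the remaining tail is returned with 1 + the tail's count of it, so no counting table is ever built.
import Mathlib
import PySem

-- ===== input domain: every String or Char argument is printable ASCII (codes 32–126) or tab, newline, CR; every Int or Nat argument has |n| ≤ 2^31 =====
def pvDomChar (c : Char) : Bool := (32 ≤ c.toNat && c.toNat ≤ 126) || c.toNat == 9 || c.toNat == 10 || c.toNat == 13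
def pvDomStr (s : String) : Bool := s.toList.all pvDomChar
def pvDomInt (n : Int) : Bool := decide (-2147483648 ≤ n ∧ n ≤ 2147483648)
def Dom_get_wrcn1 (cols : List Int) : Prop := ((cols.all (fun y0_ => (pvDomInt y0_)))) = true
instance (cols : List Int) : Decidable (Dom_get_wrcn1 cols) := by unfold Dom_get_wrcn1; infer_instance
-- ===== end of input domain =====

-- B replaces A's frequency dict + key scan by a duplicate-ahead scan (first element
-- still present in the remaining tail); alternative decomposition, not faster.

-- ===== PORT A =====
def get_wrcn1 (cols : List Int) : List Int :=
  -- d = defaultdict(int); for col in cols: d[col] += 1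
  let d : PySem.Dict Int Int :=
    cols.foldl (fun d col => d.modify col 0 (· + 1)) PySem.Dict.empty
  if 2 ≤ cols.length then
    -- for key in d: if d[key] >= 2: return [int(key), d[key]]
    match d.keys.find? (fun key => decide (2 ≤ d.getD key 0)) with
    | some key => [key, d.getD key 0]
    | none => [-1, -1]
  else [-1, -1]

-- ===== PORT B =====
-- the while-loop peeling tail.pop(0): structural recursion on the tail
def pvScan : List Int → List Int
  | [] => [-1, -1]
  | col :: tail =>
    if tail.contains col then [col, 1 + ((tail.count col : Nat) : Int)]
    else pvScan tail

def get_wrcn1_alt (cols : List Int) : List Int :=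
  if 2 ≤ cols.length then pvScan cols else [-1, -1]

-- ===== PRECONDITION & SPEC =====
def Spec_get_wrcn1 (cols : List Int) (out : List Int) : Prop := out = get_wrcn1_alt cols
instance (cols : List Int) (out : List Int) : Decidable (Spec_get_wrcn1 cols out) := by unfold Spec_get_wrcn1; infer_instance

-- ===== CLAIM (what is proved, stated in full; the proofs are below) =====
def Claim_equal_get_wrcn1 : Prop := ∀ (cols : List Int), Dom_get_wrcn1 cols → Spec_get_wrcn1 cols (get_wrcn1 cols)

-- ===== LEMMAS AND PROOFS =====

-- find? over a Python-set fold (first-occurrence dedup) agrees with find? over the raw list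
lemma pv_find?_foldl_add {α : Type} [BEq α] [LawfulBEq α] (p : α → Bool) :
    ∀ (xs s : List α), ((xs.foldl PySem.Set.add s).find? p) = (s.find? p).or (xs.find? p) := by
  intro xs
  induction xs with
  | nil => intro s; simp
  | cons x xs ih =>
    intro s
    rw [List.foldl_cons, ih]
    by_cases hc : s.contains x
    · have hx : x ∈ s := by simpa using hc
      have hadd : PySem.Set.add s x = s := by
        simp [PySem.Set.add]; exact hx
      rw [hadd]
      by_cases hp : p x = true
      · have hs : (s.find? p).isSome := by
          rw [List.find?_isSome]; exact ⟨x, hx, hp⟩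
        obtain ⟨v, hv⟩ := Option.isSome_iff_exists.mp hs
        simp [hp, hv]
      · simp [Bool.of_not_eq_true hp]
    · have hadd : PySem.Set.add s x = s ++ [x] := by
        simp [PySem.Set.add]; simpa using hc
      rw [hadd, List.find?_append, Option.or_assoc]
      by_cases hp : p x = true
      · simp [hp]
      · simp [Bool.of_not_eq_true hp]

lemma pv_find?_ofList {α : Type} [BEq α] [LawfulBEq α] (p : α → Bool) (xs : List α) :
    (PySem.Set.ofList xs).find? p = xs.find? p := by
  rw [PySem.Set.ofList_eq_foldl, pv_find?_foldl_add]; rfl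

lemma pv_find?_congr_mem {α : Type} (p q : α → Bool) :
    ∀ (l : List α), (∀ x ∈ l, p x = q x) → l.find? p = l.find? q := by
  intro l
  induction l with
  | nil => intro _; rfl
  | cons a t ih =>
    intro h
    simp only [List.find?_cons]
    rw [h a (List.mem_cons_self), ih (fun x hx => h x (List.mem_cons_of_mem a hx))]

-- pvScan computes the first element of cols whose total count in cols is ≥ 2,
-- together with that count
lemma pvScan_eq_find (cols : List Int) :
    pvScan cols =
      match cols.find? (fun c => decide (2 ≤ ((cols.count c : Nat) : Int))) with
      | some k => [k, ((cols.count k : Nat) : Int)]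
      | none => [-1, -1] := by
  induction cols with
  | nil => rfl
  | cons c t ih =>
    by_cases hc : t.contains c
    · have hmem : c ∈ t := by simpa using hc
      have hcnt : 1 ≤ t.count c := List.count_pos_iff.mpr hmem
      have hp : (decide (2 ≤ ((((c :: t).count c : Nat)) : Int))) = true := by
        simp [List.count_cons_self]; omega
      rw [show pvScan (c :: t) = [c, 1 + ((t.count c : Nat) : Int)] by
        simp only [pvScan]; rw [if_pos hc]]
      rw [List.find?_cons_of_pos (p := fun x => decide (2 ≤ (((c :: t).count x : Nat) : Int))) hp]
      simp [List.count_cons_self]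
      push_cast
      ring
    · have hmem : c ∉ t := by simpa using hc
      have hcnt : t.count c = 0 := List.count_eq_zero.mpr hmem
      have hp : (decide (2 ≤ ((((c :: t).count c : Nat)) : Int))) = false := by
        simp [List.count_cons_self, hcnt]
      rw [show pvScan (c :: t) = pvScan t by
        simp only [pvScan]; rw [if_neg hc]]
      simp only [List.find?_cons, hp]
      have hcongr : t.find? (fun x => decide (2 ≤ (((c :: t).count x : Nat) : Int)))
          = t.find? (fun x => decide (2 ≤ ((t.count x : Nat) : Int))) := by
        apply pv_find?_congr_mem
        intro x hx
        have hxc : x ≠ c := fun h => hmem (h ▸ hx)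
        simp [List.count_cons, Ne.symm hxc]
      rw [hcongr, ih]
      cases hfind : t.find? (fun x => decide (2 ≤ ((t.count x : Nat) : Int))) with
      | none => rfl
      | some k =>
        have hk : k ∈ t := List.mem_of_find?_eq_some hfind
        have hkc : k ≠ c := fun h => hmem (h ▸ hk)
        simp [List.count_cons, hkc, Ne.symm hkc]

-- ===== VERDICT (by name: the statement is the Claim_ definition above) =====
theorem get_wrcn1_spec : Claim_equal_get_wrcn1 := by
  intro cols _
  unfold Spec_get_wrcn1 get_wrcn1 get_wrcn1_alt
  rw [← PySem.Dict.counter_eq_foldl]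
  simp only [PySem.Dict.keys_counter, PySem.Dict.getD_counter, pv_find?_ofList]
  by_cases h : 2 ≤ cols.length
  · simp only [h, if_pos, pvScan_eq_find]
  · simp [h]
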